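-- pv_equiv track=rewrite | github.com/GeraDot4815/Itmo_ASD_labs | Lab-5/task2(1).py | Matrix_Chain
-- ===== SOURCE A (Python) =====
-- def Matrix_Chain(p, i , j):
--     if i == j:
--         return 0
--     k = j - 1
--     count = (Matrix_Chain(p, i, k)
--              + Matrix_Chain(p, k + 1, j)
--              + p [i-1] * p[k] * p[j])
--     return count
-- ===== SOURCE B (Python) =====
-- def Matrix_Chain(p, i, j):
--     count = 0
--     for m in range(i + 1, j + 1):
--         count += p[i-1] * p[m-1] * p[m]
--     return count
-- ===== Notes on version B (the rewrite author's own statement) =====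
-- stated objective: simpler
-- what changed: Replaces the linear recursion (whose second call always hits the base case) by a single iterative summation loop over m in range(i+1, j+1).
import Mathlib
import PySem

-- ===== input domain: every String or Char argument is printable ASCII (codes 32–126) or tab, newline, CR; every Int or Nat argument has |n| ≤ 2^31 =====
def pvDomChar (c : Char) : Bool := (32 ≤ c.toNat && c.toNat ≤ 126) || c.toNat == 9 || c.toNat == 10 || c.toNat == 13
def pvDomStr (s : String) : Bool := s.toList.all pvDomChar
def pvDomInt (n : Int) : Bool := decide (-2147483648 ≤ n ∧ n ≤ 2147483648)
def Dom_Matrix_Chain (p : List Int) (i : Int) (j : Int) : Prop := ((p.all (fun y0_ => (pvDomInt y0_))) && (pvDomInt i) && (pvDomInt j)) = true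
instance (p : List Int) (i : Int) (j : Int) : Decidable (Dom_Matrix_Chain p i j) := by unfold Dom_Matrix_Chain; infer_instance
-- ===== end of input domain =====

-- B replaces A's linear recursion (whose second call always hits the base case)
-- by a single iterative summation loop; equal return values on Pre_.

-- ===== PORT A =====
def Matrix_Chain (p : List Int) (i : Int) (j : Int) : Int :=
  if i == j then 0
  else if _h : i < j then
    let k := j - 1
    (Matrix_Chain p i k) + (Matrix_Chain p (k + 1) j)
      + (PySem.List.pyGetD p (i - 1) 0) * (PySem.List.pyGetD p k 0) * (PySem.List.pyGetD p j 0)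
  else 0  -- Python diverges here (infinite recursion); excluded by Pre_
termination_by (j - i).toNat
decreasing_by all_goals (simp_all; try omega)

-- ===== PORT B =====
def Matrix_Chain_alt (p : List Int) (i : Int) (j : Int) : Int :=
  (PySem.List.pyRange (i + 1) (j + 1) 1).foldl
    (fun count m =>
      count + (PySem.List.pyGetD p (i - 1) 0) * (PySem.List.pyGetD p (m - 1) 0) * (PySem.List.pyGetD p m 0))
    0

-- ===== PRECONDITION & SPEC =====
-- Pre_ = exactly the inputs on which Python A returns: i ≤ j (A recurses forever for i > j),
-- and when i < j every accessed index (i-1 through j, Python negative-index rule) is in range.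
def Pre_Matrix_Chain (p : List Int) (i : Int) (j : Int) : Prop :=
  i ≤ j ∧ (i < j → (-(p.length : Int) ≤ i - 1 ∧ j < (p.length : Int)))
instance (p : List Int) (i : Int) (j : Int) : Decidable (Pre_Matrix_Chain p i j) := by
  unfold Pre_Matrix_Chain; infer_instance
def pvWitness_Matrix_Chain : List Int × Int × Int := ([2, 3, 4, 5], 1, 3)

def Spec_Matrix_Chain (p : List Int) (i : Int) (j : Int) (out : Int) : Prop := out = Matrix_Chain_alt p i j
instance (p : List Int) (i : Int) (j : Int) (out : Int) : Decidable (Spec_Matrix_Chain p i j out) := by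
  unfold Spec_Matrix_Chain; infer_instance

-- ===== CLAIM (what is proved, stated in full; the proofs are below) =====
def Claim_equal_Matrix_Chain : Prop := ∀ (p : List Int) (i : Int) (j : Int), Dom_Matrix_Chain p i j → Pre_Matrix_Chain p i j → Spec_Matrix_Chain p i j (Matrix_Chain p i j)

-- ===== LEMMAS AND PROOFS =====

theorem Matrix_Chain_alt_succ (p : List Int) (i j : Int) (h : i ≤ j) :
    Matrix_Chain_alt p i (j + 1) =
      Matrix_Chain_alt p i j
        + (PySem.List.pyGetD p (i - 1) 0) * (PySem.List.pyGetD p j 0) * (PySem.List.pyGetD p (j + 1) 0) := by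
  unfold Matrix_Chain_alt
  rw [PySem.List.pyRange_one_succ_right (by omega : i + 1 ≤ j + 1), List.foldl_append]
  simp

theorem Matrix_Chain_eq_alt (p : List Int) (i j : Int) (h : i ≤ j) :
    Matrix_Chain p i j = Matrix_Chain_alt p i j := by
  obtain ⟨n, hn⟩ : ∃ n : Nat, j = i + n := ⟨(j - i).toNat, by omega⟩
  subst hn
  induction n with
  | zero =>
    simp [Matrix_Chain, Matrix_Chain_alt]
  | succ m ih =>
    rw [Matrix_Chain, if_neg (by simp; omega), dif_pos (by omega : i < i + (↑(m + 1) : Int))]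
    show Matrix_Chain p i (i + ↑(m + 1) - 1)
        + Matrix_Chain p (i + ↑(m + 1) - 1 + 1) (i + ↑(m + 1))
        + PySem.List.pyGetD p (i - 1) 0 * PySem.List.pyGetD p (i + ↑(m + 1) - 1) 0
          * PySem.List.pyGetD p (i + ↑(m + 1)) 0
      = Matrix_Chain_alt p i (i + ↑(m + 1))
    have hbase : Matrix_Chain p (i + ↑(m + 1) - 1 + 1) (i + ↑(m + 1)) = 0 := by
      rw [Matrix_Chain]; simp
    have harg : i + (↑(m + 1) : Int) - 1 = i + ↑m := by push_cast; ring
    rw [hbase, harg, ih (by omega)]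
    have hsp : i + (↑(m + 1) : Int) = (i + ↑m) + 1 := by push_cast; ring
    rw [hsp, Matrix_Chain_alt_succ p i (i + ↑m) (by omega)]
    ring

-- ===== VERDICT (by name: the statement is the Claim_ definition above) =====
theorem Matrix_Chain_spec : Claim_equal_Matrix_Chain := by
  intro p i j _ hpre
  unfold Spec_Matrix_Chain
  exact Matrix_Chain_eq_alt p i j hpre.1
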